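-- pv_equiv track=rewrite | github.com/inkognida/21_school | leetcode/uni-value_grid.py | median_bigger
-- ===== SOURCE A (Python) =====
-- from typing import List
-- from math import floor, ceil
--
-- def median_bigger(grid: List[List[int]], x: int) -> int:
--     mb = sorted(grid)[ceil((len(grid))/2)]
--     grid_copy = grid.copy()
--     cb = 0
--
--     for el in grid:
--         if (mb == el):
--             continue
--         elif (el > mb):
--             tmp = el
--             while (el != mb):
--                 cb += 1
--                 el -= x
--                 if (el < min(grid_copy)):
--                     return (-1)
--             grid[grid.index(tmp)] = el
--         elif (el < mb):
--             tmp = el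
--             while (el != mb):
--                 cb += 1
--                 el += x
--                 if el > max(grid_copy):
--                     return (-1)
--             grid[grid.index(tmp)] = el
--     return (cb)
-- ===== SOURCE B (Python) =====
-- def median_bigger(grid, x):
--     # closed form: each element needs |el - mb| // x steps; -1 if any gap not divisible by x
--     mb = sorted(grid)[(len(grid) + 1) // 2]
--     total = 0
--     for el in grid:
--         d = abs(el - mb)
--         if d == 0:
--             continue
--         if d % x != 0:
--             return -1
--         total += d // x
--     return total
-- ===== Notes on version B (the rewrite author's own statement) =====
-- stated objective: faster
-- what changed: replaces the per-element unit-step simulation loops (step x at a time until the pivot, with min/max escape checks) by a closed-form sum of abs(el-mb)//x with a divisibility check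
import Mathlib
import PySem

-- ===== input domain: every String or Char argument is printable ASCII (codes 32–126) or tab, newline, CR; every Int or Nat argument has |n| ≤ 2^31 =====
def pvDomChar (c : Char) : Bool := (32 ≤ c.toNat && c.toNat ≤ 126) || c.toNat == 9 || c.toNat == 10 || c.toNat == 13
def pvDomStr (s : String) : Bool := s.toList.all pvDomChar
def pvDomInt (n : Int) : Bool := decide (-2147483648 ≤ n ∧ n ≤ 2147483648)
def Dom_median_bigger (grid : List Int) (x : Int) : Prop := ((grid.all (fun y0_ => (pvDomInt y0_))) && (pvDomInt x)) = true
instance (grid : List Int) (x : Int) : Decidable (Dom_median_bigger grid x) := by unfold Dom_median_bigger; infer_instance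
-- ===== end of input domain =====

-- B replaces A's unit-step simulation by a closed-form sum of |el-mb| // x with a divisibility
-- check; equivalence is about the RETURN value only (Python A mutates `grid` in place, B does not).

-- ===== PORT A =====
-- while el != mb: cb += 1; el -= x; if el < min(grid_copy): return -1   (none = the `return -1`;
-- fuel only makes the recursion total — inside Pre_ the given fuel is never exhausted)
def pvLoopDown (x mb : Int) (gc : List Int) : Nat → Int → Int → Option (Int × Int)
  | 0, _, _ => none
  | f + 1, el, cb =>
    if el ≠ mb then
      let cb' := cb + 1
      let el' := el - x
      if el' < (PySem.List.min? gc (fun v => v)).getD 0 then none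
      else pvLoopDown x mb gc f el' cb'
    else some (el, cb)

-- while el != mb: cb += 1; el += x; if el > max(grid_copy): return -1
def pvLoopUp (x mb : Int) (gc : List Int) : Nat → Int → Int → Option (Int × Int)
  | 0, _, _ => none
  | f + 1, el, cb =>
    if el ≠ mb then
      let cb' := cb + 1
      let el' := el + x
      if (PySem.List.max? gc (fun v => v)).getD 0 < el' then none
      else pvLoopUp x mb gc f el' cb'
    else some (el, cb)

-- the `for el in grid` loop; g is the (mutated) grid, gc the unmutated grid_copy
def pvForLoop (x mb : Int) (gc : List Int) (g : List Int) (i : Nat) (cb : Int) : Int :=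
  if h : i < g.length then
    let el := g[i]
    if mb = el then pvForLoop x mb gc g (i + 1) cb
    else if mb < el then
      match pvLoopDown x mb gc ((el - (PySem.List.min? gc (fun v => v)).getD 0).toNat + 2) el cb with
      | none => -1
      | some (elf, cb') =>
          pvForLoop x mb gc (g.set ((PySem.List.index? g el).getD 0) elf) (i + 1) cb'
    else
      match pvLoopUp x mb gc (((PySem.List.max? gc (fun v => v)).getD 0 - el).toNat + 2) el cb with
      | none => -1
      | some (elf, cb') =>
          pvForLoop x mb gc (g.set ((PySem.List.index? g el).getD 0) elf) (i + 1) cb'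
  else cb
termination_by g.length - i
decreasing_by all_goals (try simp [List.length_set]); omega

def median_bigger (grid : List Int) (x : Int) : Int :=
  match PySem.List.pyGet? (PySem.List.sorted grid (fun v => v)) (((grid.length : Int) + 1) / 2) with
  | none => 0      -- Python raises IndexError here (len(grid) ≤ 1); excluded by Pre_
  | some mb => pvForLoop x mb grid grid 0 0

-- ===== PORT B =====
-- one pass: total += |el - mb| // x, early None (= return -1) on a non-divisible gap
def pvSumSteps (x mb : Int) : List Int → Int → Option Int
  | [], total => some total
  | el :: rest, total =>
    let d := |el - mb|
    if d = 0 then pvSumSteps x mb rest total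
    else if PySem.Int.mod d x ≠ 0 then none
    else pvSumSteps x mb rest (total + PySem.Int.floordiv d x)

def median_bigger_alt (grid : List Int) (x : Int) : Int :=
  match PySem.List.pyGet? (PySem.List.sorted grid (fun v => v)) (((grid.length : Int) + 1) / 2) with
  | none => 0      -- unreachable inside Pre_
  | some mb =>
    match pvSumSteps x mb grid 0 with
    | none => -1
    | some total => total

-- ===== PRECONDITION & SPEC =====
-- Pre_ excludes exactly the inputs where Python A does not return: len(grid) ≤ 1 (IndexError on
-- sorted(grid)[ceil(len/2)]), and x ≤ 0 with a non-constant grid (the while loop never terminates).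
def Pre_median_bigger (grid : List Int) (x : Int) : Prop :=
  2 ≤ grid.length ∧ (0 < x ∨ ∀ a ∈ grid, a = grid.headD 0)
instance (grid : List Int) (x : Int) : Decidable (Pre_median_bigger grid x) := by
  unfold Pre_median_bigger; infer_instance

def pvWitness_median_bigger : List Int × Int := ([1, 2, 3], 1)

def Spec_median_bigger (grid : List Int) (x : Int) (out : Int) : Prop := out = median_bigger_alt grid x
instance (grid : List Int) (x : Int) (out : Int) : Decidable (Spec_median_bigger grid x out) := by unfold Spec_median_bigger; infer_instance

-- ===== CLAIM (what is proved, stated in full; the proofs are below) =====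
def Claim_equal_median_bigger : Prop := ∀ (grid : List Int) (x : Int), Dom_median_bigger grid x → Pre_median_bigger grid x → Spec_median_bigger grid x (median_bigger grid x)

-- ===== LEMMAS AND PROOFS =====

theorem pvLoopDown_below (x mb : Int) (gc : List Int) (hx : 0 < x) :
    ∀ f el cb, el < mb → (el - (PySem.List.min? gc (fun v => v)).getD 0).toNat + 2 ≤ f →
      pvLoopDown x mb gc f el cb = none := by
  intro f
  induction f with
  | zero => intro el cb _ hf; omega
  | succ f ih =>
    intro el cb hel hf
    have hne : el ≠ mb := by omega
    simp only [pvLoopDown, if_pos hne]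
    by_cases h1 : el - x < (PySem.List.min? gc (fun v => v)).getD 0
    · simp [h1]
    · simp only [if_neg h1]
      exact ih (el - x) (cb + 1) (by omega) (by omega)

theorem pvLoopDown_spec (x mb : Int) (gc : List Int) (hx : 0 < x)
    (hmn : (PySem.List.min? gc (fun v => v)).getD 0 ≤ mb) :
    ∀ f el cb, mb ≤ el → (el - (PySem.List.min? gc (fun v => v)).getD 0).toNat + 2 ≤ f →
      pvLoopDown x mb gc f el cb =
        if x ∣ (el - mb) then some (mb, cb + (el - mb) / x) else none := by
  intro f
  induction f with
  | zero => intro el cb _ hf; omega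
  | succ f ih =>
    intro el cb hel hf
    by_cases hem : el = mb
    · subst hem
      simp [pvLoopDown]
    · have hlt : mb < el := by omega
      simp only [pvLoopDown, if_pos (show el ≠ mb from hem)]
      by_cases h1 : el - x < (PySem.List.min? gc (fun v => v)).getD 0
      · have hnd : ¬ x ∣ (el - mb) := by
          intro hdvd
          have := Int.le_of_dvd (by omega) hdvd
          omega
        simp [h1, hnd]
      · simp only [if_neg h1]
        by_cases h2 : mb ≤ el - x
        · rw [ih (el - x) (cb + 1) h2 (by omega)]
          have hiff : x ∣ (el - x - mb) ↔ x ∣ (el - mb) := by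
            constructor
            · intro h; have := dvd_add h (dvd_refl x); convert this using 1; ring
            · intro h; have := dvd_sub h (dvd_refl x); convert this using 1; ring
          by_cases hd : x ∣ (el - mb)
          · rw [if_pos (hiff.mpr hd), if_pos hd]
            have : (el - mb) / x = (el - x - mb) / x + 1 := by
              have h3 : el - mb = (el - x - mb) + 1 * x := by ring
              rw [h3, Int.add_mul_ediv_right _ _ (by omega : x ≠ 0)]
            rw [this]; ring_nf
          · rw [if_neg (fun hc => hd (hiff.mp hc)), if_neg hd]
        · have hnd : ¬ x ∣ (el - mb) := by
            intro hdvd; have := Int.le_of_dvd (by omega) hdvd; omega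
          rw [pvLoopDown_below x mb gc hx f (el - x) (cb + 1) (by omega) (by omega), if_neg hnd]

theorem pvLoopUp_above (x mb : Int) (gc : List Int) (hx : 0 < x) :
    ∀ f el cb, mb < el → ((PySem.List.max? gc (fun v => v)).getD 0 - el).toNat + 2 ≤ f →
      pvLoopUp x mb gc f el cb = none := by
  intro f
  induction f with
  | zero => intro el cb _ hf; omega
  | succ f ih =>
    intro el cb hel hf
    have hne : el ≠ mb := by omega
    simp only [pvLoopUp, if_pos hne]
    by_cases h1 : (PySem.List.max? gc (fun v => v)).getD 0 < el + x
    · simp [h1]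
    · simp only [if_neg h1]
      exact ih (el + x) (cb + 1) (by omega) (by omega)

theorem pvLoopUp_spec (x mb : Int) (gc : List Int) (hx : 0 < x)
    (hmx : mb ≤ (PySem.List.max? gc (fun v => v)).getD 0) :
    ∀ f el cb, el ≤ mb → ((PySem.List.max? gc (fun v => v)).getD 0 - el).toNat + 2 ≤ f →
      pvLoopUp x mb gc f el cb =
        if x ∣ (mb - el) then some (mb, cb + (mb - el) / x) else none := by
  intro f
  induction f with
  | zero => intro el cb _ hf; omega
  | succ f ih =>
    intro el cb hel hf
    by_cases hem : el = mb
    · subst hem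
      simp [pvLoopUp]
    · have hlt : el < mb := by omega
      simp only [pvLoopUp, if_pos (show el ≠ mb from hem)]
      by_cases h1 : (PySem.List.max? gc (fun v => v)).getD 0 < el + x
      · have hnd : ¬ x ∣ (mb - el) := by
          intro hdvd
          have := Int.le_of_dvd (by omega) hdvd
          omega
        simp [h1, hnd]
      · simp only [if_neg h1]
        by_cases h2 : el + x ≤ mb
        · rw [ih (el + x) (cb + 1) h2 (by omega)]
          have hiff : x ∣ (mb - (el + x)) ↔ x ∣ (mb - el) := by
            constructor
            · intro h; have := dvd_add h (dvd_refl x); convert this using 1; ring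
            · intro h; have := dvd_sub h (dvd_refl x); convert this using 1; ring
          by_cases hd : x ∣ (mb - el)
          · rw [if_pos (hiff.mpr hd), if_pos hd]
            have : (mb - el) / x = (mb - (el + x)) / x + 1 := by
              have h3 : mb - el = (mb - (el + x)) + 1 * x := by ring
              rw [h3, Int.add_mul_ediv_right _ _ (by omega : x ≠ 0)]
            rw [this]; ring_nf
          · rw [if_neg (fun hc => hd (hiff.mp hc)), if_neg hd]
        · have hnd : ¬ x ∣ (mb - el) := by
            intro hdvd; have := Int.le_of_dvd (by omega) hdvd; omega
          rw [pvLoopUp_above x mb gc hx f (el + x) (cb + 1) (by omega) (by omega), if_neg hnd]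

theorem pvIndexAt (g : List Int) (i : Nat) (hi : i < g.length) (v : Int) (hv : g[i] = v)
    (hpre : ∀ j (hj : j < i), g[j]'(by omega) ≠ v) : PySem.List.index? g v = some i := by
  rw [PySem.List.index?_eq_some_iff]
  refine ⟨g.take i, g.drop (i + 1), ?_, by simp [List.length_take]; omega, ?_⟩
  · conv_lhs => rw [← List.take_append_drop i g]
    rw [List.drop_eq_getElem_cons hi, hv]
  · intro hmem
    obtain ⟨j, hj, hjv⟩ := List.mem_iff_getElem.mp hmem
    have hjlen : j < i := by simp [List.length_take] at hj; omega
    rw [List.getElem_take] at hjv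
    exact hpre j hjlen hjv

theorem pvForLoop_spec (x mb : Int) (gc : List Int) (hx : 0 < x)
    (hmn : (PySem.List.min? gc (fun v => v)).getD 0 ≤ mb)
    (hmx : mb ≤ (PySem.List.max? gc (fun v => v)).getD 0) :
    ∀ k g i cb, g.length - i ≤ k → (∀ j (hj : j < i) (h2 : j < g.length), g[j] = mb) →
      pvForLoop x mb gc g i cb =
        match pvSumSteps x mb (g.drop i) cb with
        | none => -1
        | some t => t := by
  intro k
  induction k with
  | zero =>
    intro g i cb hk hinv
    have h : ¬ i < g.length := by omega
    rw [pvForLoop, dif_neg h, List.drop_of_length_le (by omega)]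
    simp [pvSumSteps]
  | succ k ih =>
    intro g i cb hk hinv
    by_cases h : i < g.length
    · rw [pvForLoop, dif_pos h, List.drop_eq_getElem_cons h]
      by_cases he : mb = g[i]
      · rw [if_pos he]
        rw [ih g (i + 1) cb (by omega) ?_]
        · have habs : |g[i] - mb| = 0 := by rw [← he]; simp
          simp [pvSumSteps, habs]
        · intro j hj h2
          rcases Nat.lt_succ_iff_lt_or_eq.mp hj with h3 | h3
          · exact hinv j h3 h2
          · subst h3; exact he.symm
      · rw [if_neg he]
        by_cases hgt : mb < g[i]
        · rw [if_pos hgt]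
          rw [pvLoopDown_spec x mb gc hx hmn _ g[i] cb (le_of_lt hgt) (le_refl _)]
          have habs : |g[i] - mb| = g[i] - mb := abs_of_pos (by omega)
          by_cases hd : x ∣ (g[i] - mb)
          · rw [if_pos hd]
            have hidx : PySem.List.index? g g[i] = some i := by
              apply pvIndexAt g i h g[i] rfl
              intro j hj hc
              have hg := hinv j hj (by omega)
              rw [hg] at hc
              exact he hc
            rw [hidx]
            show pvForLoop x mb gc (g.set i mb) (i + 1) (cb + (g[i] - mb) / x) = _
            have hset : (g.set i mb).drop (i + 1) = g.drop (i + 1) := by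
              rw [List.drop_set, if_pos (by omega)]
            rw [ih (g.set i mb) (i + 1) (cb + (g[i] - mb) / x) (by simp [List.length_set]; omega) ?_]
            · rw [hset]
              have hstep : pvSumSteps x mb (g[i] :: g.drop (i + 1)) cb =
                  pvSumSteps x mb (g.drop (i + 1)) (cb + (g[i] - mb) / x) := by
                simp only [pvSumSteps, habs]
                rw [if_neg (by omega : ¬ (g[i] - mb = 0)),
                  if_neg (not_ne_iff.mpr ((PySem.Int.mod_eq_zero_iff_dvd _ _).mpr hd)),
                  PySem.Int.floordiv_eq_ediv_of_pos hx]
              rw [hstep]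
            · intro j hj h2
              rw [List.getElem_set]
              rcases Nat.lt_succ_iff_lt_or_eq.mp hj with h3 | h3
              · rw [if_neg (by omega)]
                exact hinv j h3 (by simpa [List.length_set] using h2)
              · rw [if_pos (by omega)]
          · rw [if_neg hd]
            have hstep : pvSumSteps x mb (g[i] :: g.drop (i + 1)) cb = none := by
              simp only [pvSumSteps, habs]
              rw [if_neg (by omega : ¬ (g[i] - mb = 0)),
                if_pos (by simp only [ne_eq, PySem.Int.mod_eq_zero_iff_dvd]; exact hd)]
            rw [hstep]
        · have hlt : g[i] < mb := by omega
          rw [if_neg hgt]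
          rw [pvLoopUp_spec x mb gc hx hmx _ g[i] cb (le_of_lt hlt) (le_refl _)]
          have habs : |g[i] - mb| = mb - g[i] := by
            rw [abs_sub_comm]; exact abs_of_pos (by omega)
          by_cases hd : x ∣ (mb - g[i])
          · rw [if_pos hd]
            have hidx : PySem.List.index? g g[i] = some i := by
              apply pvIndexAt g i h g[i] rfl
              intro j hj hc
              have hg := hinv j hj (by omega)
              rw [hg] at hc
              exact he hc
            rw [hidx]
            show pvForLoop x mb gc (g.set i mb) (i + 1) (cb + (mb - g[i]) / x) = _
            have hset : (g.set i mb).drop (i + 1) = g.drop (i + 1) := by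
              rw [List.drop_set, if_pos (by omega)]
            rw [ih (g.set i mb) (i + 1) (cb + (mb - g[i]) / x) (by simp [List.length_set]; omega) ?_]
            · rw [hset]
              have hstep : pvSumSteps x mb (g[i] :: g.drop (i + 1)) cb =
                  pvSumSteps x mb (g.drop (i + 1)) (cb + (mb - g[i]) / x) := by
                simp only [pvSumSteps, habs]
                rw [if_neg (by omega : ¬ (mb - g[i] = 0)),
                  if_neg (not_ne_iff.mpr ((PySem.Int.mod_eq_zero_iff_dvd _ _).mpr hd)),
                  PySem.Int.floordiv_eq_ediv_of_pos hx]
              rw [hstep]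
            · intro j hj h2
              rw [List.getElem_set]
              rcases Nat.lt_succ_iff_lt_or_eq.mp hj with h3 | h3
              · rw [if_neg (by omega)]
                exact hinv j h3 (by simpa [List.length_set] using h2)
              · rw [if_pos (by omega)]
          · rw [if_neg hd]
            have hstep : pvSumSteps x mb (g[i] :: g.drop (i + 1)) cb = none := by
              simp only [pvSumSteps, habs]
              rw [if_neg (by omega : ¬ (mb - g[i] = 0)),
                if_pos (by simp only [ne_eq, PySem.Int.mod_eq_zero_iff_dvd]; exact hd)]
            rw [hstep]
    · rw [pvForLoop, dif_neg h, List.drop_of_length_le (by omega)]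
      simp [pvSumSteps]

theorem pvForLoop_const (x mb : Int) (gc : List Int) :
    ∀ k g i cb, g.length - i ≤ k → (∀ a ∈ g, a = mb) → pvForLoop x mb gc g i cb = cb := by
  intro k
  induction k with
  | zero =>
    intro g i cb hk hall
    have h : ¬ i < g.length := by omega
    rw [pvForLoop, dif_neg h]
  | succ k ih =>
    intro g i cb hk hall
    by_cases h : i < g.length
    · rw [pvForLoop, dif_pos h, if_pos (hall g[i] (List.getElem_mem h)).symm]
      exact ih g (i + 1) cb (by omega) hall
    · rw [pvForLoop, dif_neg h]

theorem pvSumSteps_const (x mb : Int) :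
    ∀ l cb, (∀ a ∈ l, a = mb) → pvSumSteps x mb l cb = some cb := by
  intro l
  induction l with
  | nil => intro cb _; simp [pvSumSteps]
  | cons a rest ih =>
    intro cb hall
    have ha : |a - mb| = 0 := by rw [hall a (by simp)]; simp
    simp only [pvSumSteps, ha]
    exact ih cb (fun b hb => hall b (by simp [hb]))

-- ===== VERDICT (by name: the statement is the Claim_ definition above) =====
theorem median_bigger_spec : Claim_equal_median_bigger := by
  intro grid x _ hpre
  unfold Spec_median_bigger median_bigger median_bigger_alt
  cases hget : PySem.List.pyGet? (PySem.List.sorted grid (fun v => v)) (((grid.length : Int) + 1) / 2) with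
  | none => rfl
  | some mb =>
    have hmem : mb ∈ grid := by
      have := PySem.List.mem_of_pyGet?_eq_some _ hget
      rwa [PySem.List.mem_sorted] at this
    show pvForLoop x mb grid grid 0 0 =
      match pvSumSteps x mb grid 0 with
      | none => -1
      | some total => total
    rcases hpre.2 with hx | hconst
    · -- x > 0 : the simulation counts exactly |el - mb| / x steps per element
      cases hm : PySem.List.min? grid (fun v => v) with
      | none => rw [PySem.List.min?_eq_none_iff] at hm; subst hm; simp at hmem
      | some m =>
        cases hM : PySem.List.max? grid (fun v => v) with
        | none => rw [PySem.List.max?_eq_none_iff] at hM; subst hM; simp at hmem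
        | some M =>
          have hmn : (PySem.List.min? grid (fun v => v)).getD 0 ≤ mb := by
            rw [hm]; exact PySem.List.min?_isMin hm mb hmem
          have hmx : mb ≤ (PySem.List.max? grid (fun v => v)).getD 0 := by
            rw [hM]; exact PySem.List.max?_isMax hM mb hmem
          rw [pvForLoop_spec x mb grid hx hmn hmx grid.length grid 0 0 (by omega) (by omega),
            List.drop_zero]
    · -- x ≤ 0 allowed only on a constant grid: no while loop ever runs, both sides are 0
      have hall : ∀ a ∈ grid, a = mb := fun a ha => (hconst a ha).trans (hconst mb hmem).symm
      rw [pvForLoop_const x mb grid grid.length grid 0 0 (by omega) hall,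
        pvSumSteps_const x mb grid 0 hall]
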